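-- pv_equiv track=rewrite | github.com/nelsonjchen/op-replay-clipper | tools/comma_watch.py | radiate_remaining_route_segments
-- ===== SOURCE A (Python) =====
-- from typing import Any, Iterable
--
-- def radiate_remaining_route_segments(max_segment: int, seeded_segments: Iterable[int]) -> list[int]:
--     seed_set = set(seeded_segments)
--     if not seed_set:
--         return list(range(max_segment + 1))
--
--     remaining = [segment for segment in range(max_segment + 1) if segment not in seed_set]
--     return sorted(
--         remaining,
--         key=lambda segment: (
--             min(abs(segment - seed) for seed in seed_set),
--             segment,
--         ),
--     )
-- ===== SOURCE B (Python) =====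
-- def radiate_remaining_route_segments(max_segment: int, seeded_segments) -> list[int]:
--     seeds = sorted(set(seeded_segments))
--     if not seeds:
--         return list(range(max_segment + 1))
--     out = []
--     j = 0
--     for segment in range(max_segment + 1):
--         while j + 1 < len(seeds) and seeds[j + 1] <= segment:
--             j += 1
--         d1 = abs(segment - seeds[j])
--         d2 = abs(seeds[j + 1] - segment) if j + 1 < len(seeds) else d1
--         d = min(d1, d2)
--         if d:
--             out.append((d, segment))
--     out.sort()
--     return [segment for _, segment in out]
-- ===== Notes on version B (the rewrite author's own statement) =====
-- stated objective: faster
-- what changed: Instead of computing each segment's nearest-seed distance by scanning the whole seed set (O(n*k)), B sorts the distinct seeds once and computes every distance with an amortised-O(1) forward sweep over the sorted seeds, collecting (distance, segment) pairs and sorting them lexicographically.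
import Mathlib
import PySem

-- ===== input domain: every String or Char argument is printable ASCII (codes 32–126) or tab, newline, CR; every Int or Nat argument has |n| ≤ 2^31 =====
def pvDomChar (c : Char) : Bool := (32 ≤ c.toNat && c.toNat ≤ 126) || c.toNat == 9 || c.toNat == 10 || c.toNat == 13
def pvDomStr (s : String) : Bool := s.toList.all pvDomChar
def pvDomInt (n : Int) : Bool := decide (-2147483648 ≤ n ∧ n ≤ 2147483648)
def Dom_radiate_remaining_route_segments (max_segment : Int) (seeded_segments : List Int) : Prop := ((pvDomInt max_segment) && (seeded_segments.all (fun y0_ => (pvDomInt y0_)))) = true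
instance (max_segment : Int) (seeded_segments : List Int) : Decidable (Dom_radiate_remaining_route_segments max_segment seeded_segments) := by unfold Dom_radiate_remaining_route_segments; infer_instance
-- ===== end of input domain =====

-- B replaces A's per-segment scan of the whole seed set by one sorted sweep over the seeds
-- (nearest-seed distance in amortised O(1) per segment), then a lexicographic sort of (distance, segment) pairs: asymptotically faster.

-- ===== PORT A =====
-- min(<nonempty iterable of ints>); the [] case is unreachable at the call site (seed_set is nonempty there)
def pyMinInt (xs : List Int) : Int :=
  match xs with
  | [] => 0
  | h :: t => t.foldl min h

def radiate_remaining_route_segments (max_segment : Int) (seeded_segments : List Int) : List Int :=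
  let seed_set := PySem.Set.ofList seeded_segments
  if seed_set = [] then PySem.List.pyRange 0 (max_segment + 1) 1
  else
    let remaining := (PySem.List.pyRange 0 (max_segment + 1) 1).filter
      (fun segment => decide (segment ∉ seed_set))
    PySem.List.sorted2 remaining
      (fun segment => pyMinInt (seed_set.map (fun seed => |segment - seed|)))
      (fun segment => segment)

-- ===== PORT B =====
-- the 'while j + 1 < len(seeds) and seeds[j + 1] <= segment: j += 1' loop of Source B;
-- the index j + 1 is checked in range before the access, so getD is exact
def bAdvance (seeds : List Int) (segment : Int) (j : Nat) : Nat :=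
  if h : j + 1 < seeds.length ∧ seeds.getD (j + 1) 0 ≤ segment then
    bAdvance seeds segment (j + 1)
  else j
termination_by seeds.length - j
decreasing_by omega

-- one iteration of Source B's 'for segment in range(max_segment + 1)' body, state (j, out);
-- every index into seeds is in range (j < len(seeds) is maintained), so getD is exact
def bStep (seeds : List Int) (acc : Nat × List (Int × Int)) (segment : Int) : Nat × List (Int × Int) :=
  let j := bAdvance seeds segment acc.1
  let d1 := |segment - seeds.getD j 0|
  let d2 := if j + 1 < seeds.length then |seeds.getD (j + 1) 0 - segment| else d1
  let d := min d1 d2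
  (j, if d ≠ 0 then acc.2 ++ [(d, segment)] else acc.2)

def radiate_remaining_route_segments_alt (max_segment : Int) (seeded_segments : List Int) : List Int :=
  let seeds := PySem.List.sorted (PySem.Set.ofList seeded_segments) (fun x => x)
  if seeds = [] then PySem.List.pyRange 0 (max_segment + 1) 1
  else
    -- out.sort() on int pairs is the lexicographic (fst, snd) sort: sorted2 is exact here
    let out := ((PySem.List.pyRange 0 (max_segment + 1) 1).foldl (bStep seeds) (0, [])).2
    (PySem.List.sorted2 out (fun p => p.1) (fun p => p.2)).map (fun p => p.2)

-- ===== PRECONDITION & SPEC =====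
def Spec_radiate_remaining_route_segments (max_segment : Int) (seeded_segments : List Int) (out : List Int) : Prop := out = radiate_remaining_route_segments_alt max_segment seeded_segments
instance (max_segment : Int) (seeded_segments : List Int) (out : List Int) : Decidable (Spec_radiate_remaining_route_segments max_segment seeded_segments out) := by unfold Spec_radiate_remaining_route_segments; infer_instance

-- ===== CLAIM (what is proved, stated in full; the proofs are below) =====
def Claim_equal_radiate_remaining_route_segments : Prop := ∀ (max_segment : Int) (seeded_segments : List Int), Dom_radiate_remaining_route_segments max_segment seeded_segments → Spec_radiate_remaining_route_segments max_segment seeded_segments (radiate_remaining_route_segments max_segment seeded_segments)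

-- ===== LEMMAS AND PROOFS =====

-- nearest-seed distance, the common specification of A's key and B's sweep
def nd (seeds : List Int) (s : Int) : Int := pyMinInt (seeds.map (fun x => |s - x|))

theorem pyMinInt_mem {xs : List Int} (h : xs ≠ []) : pyMinInt xs ∈ xs := by
  match xs with
  | [] => exact absurd rfl h
  | a :: t =>
    simp only [pyMinInt]
    rcases PySem.List.foldl_min_mem t a with h1 | h1
    · simp [h1]
    · exact List.mem_cons_of_mem _ h1

theorem pyMinInt_le {xs : List Int} (h : xs ≠ []) : ∀ y ∈ xs, pyMinInt xs ≤ y := by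
  match xs with
  | [] => exact absurd rfl h
  | a :: t =>
    intro y hy
    simp only [pyMinInt]
    rcases List.mem_cons.mp hy with rfl | hy
    · exact (PySem.List.foldl_min_le t y).1
    · exact (PySem.List.foldl_min_le t a).2 y hy

theorem pyMinInt_eq_of_same_mem {xs ys : List Int} (hx : xs ≠ []) (hy : ys ≠ [])
    (h : ∀ a, a ∈ xs ↔ a ∈ ys) : pyMinInt xs = pyMinInt ys :=
  le_antisymm (pyMinInt_le hx _ ((h _).mpr (pyMinInt_mem hy)))
    (pyMinInt_le hy _ ((h _).mp (pyMinInt_mem hx)))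

theorem nd_nonneg {seeds : List Int} (h : seeds ≠ []) (s : Int) : 0 ≤ nd seeds s := by
  have hm := pyMinInt_mem (xs := seeds.map (fun x => |s - x|)) (by simpa using h)
  rcases List.mem_map.mp hm with ⟨x, _, hx⟩
  rw [nd, ← hx]; positivity

theorem nd_eq_zero_iff {seeds : List Int} (h : seeds ≠ []) (s : Int) :
    nd seeds s = 0 ↔ s ∈ seeds := by
  constructor
  · intro h0
    have hm := pyMinInt_mem (xs := seeds.map (fun x => |s - x|)) (by simpa using h)
    rw [nd] at h0; rw [h0] at hm
    rcases List.mem_map.mp hm with ⟨x, hx, hx0⟩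
    have : s = x := by have := abs_eq_zero.mp hx0; omega
    simpa [this] using hx
  · intro hs
    have hle := pyMinInt_le (xs := seeds.map (fun x => |s - x|)) (by simpa using h)
      0 (List.mem_map.mpr ⟨s, hs, by simp⟩)
    have h2 := nd_nonneg h s
    rw [nd] at h2 ⊢
    omega

-- decorate–sort–undecorate: sorting (f s, s) pairs lexicographically is the keyed sort
theorem insertBy_map {α β : Type} (g : α → β) (b : α → α → Bool) (b' : β → β → Bool)
    (h : ∀ a c, b' (g a) (g c) = b a c) (x : α) (ys : List α) :
    PySem.List.insertBy b' (g x) (ys.map g) = (PySem.List.insertBy b x ys).map g := by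
  induction ys with
  | nil => simp [PySem.List.insertBy]
  | cons y t ih =>
    simp only [List.map_cons, PySem.List.insertBy, h]
    by_cases hb : b x y = true
    · simp [hb]
    · simp only [Bool.not_eq_true] at hb
      simp [hb, ih]

theorem sorted2_decorate (f : Int → Int) (xs : List Int) :
    PySem.List.sorted2 (xs.map (fun s => (f s, s))) (fun p => p.1) (fun p => p.2) false
      = (PySem.List.sorted2 xs f (fun s => s) false).map (fun s => (f s, s)) := by
  simp only [PySem.List.sorted2, Bool.false_eq_true, if_false]
  generalize hacc : ([] : List (Int × Int)) = acc'
  have : acc' = ([] : List Int).map (fun s => (f s, s)) := by simp [← hacc]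
  rw [this]
  generalize ([] : List Int) = acc
  induction xs generalizing acc with
  | nil => simp
  | cons x t ih =>
    simp only [List.map_cons, List.foldl_cons]
    rw [insertBy_map (fun s => (f s, s))
      (fun a c => decide (f a < f c) || (!decide (f c < f a) && decide (a < c)))
      (fun p q => decide (p.1 < q.1) || (!decide (q.1 < p.1) && decide (p.2 < q.2)))
      (fun a c => rfl)]
    exact ih _

-- monotonicity of a (·<·)-pairwise list at getD indices
theorem getD_mono_of_pairwise {seeds : List Int} (hs : seeds.Pairwise (· < ·))
    {i k : Nat} (hik : i ≤ k) (hk : k < seeds.length) :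
    seeds.getD i 0 ≤ seeds.getD k 0 := by
  rcases Nat.eq_or_lt_of_le hik with rfl | hlt
  · exact le_refl _
  · have hi : i < seeds.length := lt_trans hlt hk
    rw [seeds.getD_eq_getElem 0 hi, seeds.getD_eq_getElem 0 hk]
    exact le_of_lt (List.pairwise_iff_getElem.mp hs i k hi hk hlt)

-- properties of the while loop
theorem bAdvance_spec (seeds : List Int) (s : Int) (j : Nat) (hj : j < seeds.length) :
    j ≤ bAdvance seeds s j ∧ bAdvance seeds s j < seeds.length ∧
      (bAdvance seeds s j = j ∨ seeds.getD (bAdvance seeds s j) 0 ≤ s) ∧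
      (bAdvance seeds s j + 1 < seeds.length → s < seeds.getD (bAdvance seeds s j + 1) 0) := by
  induction hn : seeds.length - j using Nat.strong_induction_on generalizing j with
  | _ n ih =>
    rw [bAdvance]
    by_cases h : j + 1 < seeds.length ∧ seeds.getD (j + 1) 0 ≤ s
    · rw [dif_pos h]
      have hrec := ih (seeds.length - (j + 1)) (by omega) (j + 1) h.1 rfl
      refine ⟨by omega, hrec.2.1, ?_, hrec.2.2.2⟩
      rcases hrec.2.2.1 with heq | hle
      · right; rw [heq]; exact h.2
      · right; exact hle
    · rw [dif_neg h]
      refine ⟨le_refl _, hj, Or.inl rfl, ?_⟩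
      intro h1
      rcases not_and_or.mp h with h' | h'
      · exact absurd h1 h'
      · omega

-- the sweep's distance is the nearest-seed distance
theorem dist_correct {seeds : List Int} (hs : seeds.Pairwise (· < ·)) (s : Int)
    {j : Nat} (hj : j < seeds.length) (hle : seeds.getD j 0 ≤ s ∨ j = 0)
    (hmax : j + 1 < seeds.length → s < seeds.getD (j + 1) 0) :
    min |s - seeds.getD j 0|
      (if j + 1 < seeds.length then |seeds.getD (j + 1) 0 - s| else |s - seeds.getD j 0|)
      = nd seeds s := by
  have hne : seeds ≠ [] := by intro h; rw [h] at hj; simp at hj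
  have hmapne : seeds.map (fun x => |s - x|) ≠ [] := by simpa using hne
  set d1 := |s - seeds.getD j 0| with hd1
  set d2 := (if j + 1 < seeds.length then |seeds.getD (j + 1) 0 - s| else d1) with hd2
  refine le_antisymm ?_ ?_
  · -- min d1 d2 ≤ every |s - x|
    refine le_trans (le_of_eq rfl) ?_
    have hub : ∀ y ∈ seeds.map (fun x => |s - x|), min d1 d2 ≤ y := by
      intro y hy
      rcases List.mem_map.mp hy with ⟨x, hx, rfl⟩
      rcases List.mem_iff_getElem.mp hx with ⟨i, hi, rfl⟩
      by_cases hij : i ≤ j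
      · -- seeds[i] ≤ seeds[j]
        have h1 : seeds[i] ≤ seeds.getD j 0 := by
          have := getD_mono_of_pairwise hs hij hj
          rwa [seeds.getD_eq_getElem 0 (lt_of_le_of_lt hij hj)] at this
        rcases hle with hle | rfl
        · have : d1 = s - seeds.getD j 0 := by rw [hd1]; rw [abs_of_nonneg]; omega
          calc min d1 d2 ≤ d1 := min_le_left _ _
            _ ≤ |s - seeds[i]| := by rw [this, abs_of_nonneg (by omega)]; omega
        · -- j = 0, so i = 0
          have : i = 0 := Nat.le_zero.mp hij
          subst this
          have : seeds.getD 0 0 = seeds[0] := seeds.getD_eq_getElem 0 hi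
          calc min d1 d2 ≤ d1 := min_le_left _ _
            _ = |s - seeds[0]| := by rw [hd1, this]
      · -- j < i, so j + 1 ≤ i < length, seeds[i] ≥ seeds[j+1] > s
        replace hij : j < i := by omega
        have hj1 : j + 1 < seeds.length := lt_of_le_of_lt hij hi
        have h2 : seeds.getD (j + 1) 0 ≤ seeds[i] := by
          have := getD_mono_of_pairwise hs hij hi
          rwa [seeds.getD_eq_getElem 0 hi] at this
        have hsx : s < seeds[i] := lt_of_lt_of_le (hmax hj1) h2
        have hd2' : d2 = seeds.getD (j + 1) 0 - s := by
          rw [hd2, if_pos hj1, abs_of_nonneg]; have := hmax hj1; omega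
        calc min d1 d2 ≤ d2 := min_le_right _ _
          _ ≤ |s - seeds[i]| := by rw [hd2', abs_sub_comm, abs_of_nonneg (by omega)]; omega
    exact hub _ (pyMinInt_mem hmapne)
  · -- nd ≤ min d1 d2 since min d1 d2 is attained
    have hj' : seeds.getD j 0 ∈ seeds := by
      rw [seeds.getD_eq_getElem 0 hj]; exact List.getElem_mem hj
    have hmem1 : d1 ∈ seeds.map (fun x => |s - x|) := List.mem_map.mpr ⟨_, hj', rfl⟩
    have hmem2 : d2 ∈ seeds.map (fun x => |s - x|) := by
      by_cases hj1 : j + 1 < seeds.length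
      · rw [hd2, if_pos hj1, abs_sub_comm]
        refine List.mem_map.mpr ⟨seeds.getD (j + 1) 0, ?_, rfl⟩
        rw [seeds.getD_eq_getElem 0 hj1]; exact List.getElem_mem hj1
      · rw [hd2, if_neg hj1]; exact hmem1
    rcases min_choice d1 d2 with h | h <;> rw [h]
    · exact pyMinInt_le hmapne _ hmem1
    · exact pyMinInt_le hmapne _ hmem2

-- the whole sweep loop, over any aligned range, with the loop invariant on j
theorem loop_spec {seeds : List Int} (hs : seeds.Pairwise (· < ·)) :
    ∀ (n : Nat) (lo : Int) (j0 : Nat) (out0 : List (Int × Int)),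
      j0 < seeds.length → (seeds.getD j0 0 ≤ lo ∨ j0 = 0) →
      ((PySem.List.pyRange lo (lo + n) 1).foldl (bStep seeds) (j0, out0)).2
        = out0 ++ ((PySem.List.pyRange lo (lo + n) 1).filter
            (fun s => decide (nd seeds s ≠ 0))).map (fun s => (nd seeds s, s)) := by
  intro n
  induction n with
  | zero => intro lo j0 out0 _ _; simp [PySem.List.pyRange_one_eq_nil (le_refl lo)]
  | succ n ih =>
    intro lo j0 out0 hj0 hle0
    have hcast : lo + ((n + 1 : Nat) : Int) = lo + 1 + (n : Int) := by push_cast; ring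
    have hcons : PySem.List.pyRange lo (lo + ((n + 1 : Nat) : Int)) 1
        = lo :: PySem.List.pyRange (lo + 1) (lo + 1 + (n : Int)) 1 := by
      rw [hcast, PySem.List.pyRange_one_cons (by omega)]
    rw [hcons]
    have hadv := bAdvance_spec seeds lo j0 hj0
    set j1 := bAdvance seeds lo j0 with hj1def
    have hle1 : seeds.getD j1 0 ≤ lo ∨ j1 = 0 := by
      rcases hadv.2.2.1 with heq | h
      · rw [heq]; exact hle0
      · exact Or.inl h
    have hd : min |lo - seeds.getD j1 0|
        (if j1 + 1 < seeds.length then |seeds.getD (j1 + 1) 0 - lo| else |lo - seeds.getD j1 0|)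
        = nd seeds lo := dist_correct hs lo hadv.2.1 hle1 hadv.2.2.2
    have hstep : bStep seeds (j0, out0) lo
        = (j1, if nd seeds lo ≠ 0 then out0 ++ [(nd seeds lo, lo)] else out0) := by
      simp only [bStep, ← hj1def, hd]
    have hinv1 : seeds.getD j1 0 ≤ lo + 1 ∨ j1 = 0 := by
      rcases hle1 with h | h
      · exact Or.inl (by omega)
      · exact Or.inr h
    rw [List.foldl_cons, hstep, ih (lo + 1) j1 _ hadv.2.1 hinv1]
    rw [List.filter_cons]
    by_cases h0 : nd seeds lo ≠ 0
    · simp [h0]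
    · simp [h0]

-- A's key function equals nd over the sorted seeds (pointwise, for every segment)
theorem keyA_eq_nd (seeded_segments : List Int)
    (hne : PySem.Set.ofList seeded_segments ≠ []) (s : Int) :
    pyMinInt ((PySem.Set.ofList seeded_segments).map (fun seed => |s - seed|))
      = nd (PySem.List.sorted (PySem.Set.ofList seeded_segments) (fun x => x)) s := by
  have hperm : (PySem.List.sorted (PySem.Set.ofList seeded_segments) (fun x => x)).Perm
      (PySem.Set.ofList seeded_segments) := PySem.List.sorted_perm _ _ _
  have hne2 : PySem.List.sorted (PySem.Set.ofList seeded_segments) (fun x => x) ≠ [] := by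
    intro h; rw [h] at hperm; exact hne (hperm.nil_eq).symm
  apply pyMinInt_eq_of_same_mem (by simpa using hne) (by simpa using hne2)
  intro a
  simp only [List.mem_map]
  constructor
  · rintro ⟨x, hx, rfl⟩; exact ⟨x, hperm.mem_iff.mpr hx, rfl⟩
  · rintro ⟨x, hx, rfl⟩; exact ⟨x, hperm.mem_iff.mp hx, rfl⟩

-- ===== VERDICT (by name: the statement is the Claim_ definition above) =====
theorem radiate_remaining_route_segments_spec : Claim_equal_radiate_remaining_route_segments := by
  intro m ss _dom
  unfold Spec_radiate_remaining_route_segments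
  unfold radiate_remaining_route_segments radiate_remaining_route_segments_alt
  by_cases hS : PySem.Set.ofList ss = []
  · have hseeds : PySem.List.sorted (PySem.Set.ofList ss) (fun x => x) = [] := by
      rw [hS]; rfl
    simp [hS, PySem.List.sorted]
  · have hseeds : PySem.List.sorted (PySem.Set.ofList ss) (fun x => x) ≠ [] := by
      rw [Ne, PySem.List.sorted_eq_nil_iff]; exact hS
    simp only [hS, hseeds, if_false]
    set seeds := PySem.List.sorted (PySem.Set.ofList ss) (fun x => x) with hseedsdef
    have hsorted : seeds.Pairwise (· < ·) := PySem.List.sorted_ofList_pairwise_lt ss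
    -- rewrite A's key to nd
    have hkey : (fun segment => pyMinInt ((PySem.Set.ofList ss).map (fun seed => |segment - seed|)))
        = fun segment => nd seeds segment := funext (fun s => keyA_eq_nd ss hS s)
    rw [hkey]
    -- rewrite A's filter predicate to the nd-based one
    have hfilt : ∀ s, (decide (s ∉ PySem.Set.ofList ss) : Bool) = decide (nd seeds s ≠ 0) := by
      intro s
      have : s ∈ PySem.Set.ofList ss ↔ nd seeds s = 0 := by
        rw [nd_eq_zero_iff hseeds s, hseedsdef, PySem.List.mem_sorted]
      by_cases h : nd seeds s = 0 <;> simp [h, this]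
    rw [List.filter_congr (fun s _ => hfilt s)]
    -- compute B's loop result
    by_cases hm : m + 1 ≤ 0
    · rw [PySem.List.pyRange_one_eq_nil hm]; rfl
    · have hrange : PySem.List.pyRange 0 (m + 1) 1
          = PySem.List.pyRange 0 (0 + ((m + 1).toNat : Int)) 1 := by
        congr 1; omega
      rw [hrange, loop_spec hsorted (m + 1).toNat 0 0 []
        (List.length_pos_iff.mpr hseeds) (Or.inr rfl)]
      rw [List.nil_append, sorted2_decorate (nd seeds), List.map_map]
      rw [show ((fun (p : Int × Int) => p.2) ∘ fun s => (nd seeds s, s)) = fun s : Int => s from rfl,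
        List.map_id']
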